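-- pv_equiv track=rewrite | github.com/j-crawford/phase10 | phase10.py | meetsSetPhase
-- ===== SOURCE A (Python) =====
-- def meetsSetPhase(hand,firstNum,secondNum):
--
--     #always make sure the first one to run is bigger (or equal)
--     if(secondNum > firstNum):
--         temp = firstNum
--         firstNum = secondNum
--         secondNum = temp
--
--     firstSet = hasValidSet(hand,firstNum)
--
--     if(len(firstSet) == 0):
--         return False #there is not a satisfactory set for the first
--
--     #remove the first set from what to consider for the second set
--     setHand = hand.copy()
--     for i in firstSet:
--         setHand.remove(i)
--
--     secondSet = hasValidSet(setHand, secondNum)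
--     if(len(secondSet) == secondNum):
--         return True #we've found something that meets both sets
--
--     return False
--
-- def hasValidSet(hand,setNum):
--     if(len(hand) < setNum or setNum < 1):
--         return [] #sanity check
--
--     for i in hand:
--         #check if the current value has enough to be the set
--         if(hand.count(i) >= setNum):
--             #found the set, create it and return it
--             outSet = []
--             for j in range(setNum):
--                 outSet.append(i)
--             return outSet
--
--     #didn't find a set
--     return []
-- ===== SOURCE B (Python) =====
-- def meetsSetPhase(hand, firstNum, secondNum):
--     # closed-form check on the two largest multiplicities of the hand
--     f = firstNum if firstNum >= secondNum else secondNum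
--     s = firstNum + secondNum - f
--     if f < 1 or s < 0:
--         return False
--     counts = {}
--     for c in hand:
--         counts[c] = counts.get(c, 0) + 1
--     c1 = c2 = 0
--     for v in counts.values():
--         if v > c1:
--             c1, c2 = v, c1
--         elif v > c2:
--             c2 = v
--     return (c1 >= f and c2 >= s) or c1 >= f + s
-- ===== Notes on version B (the rewrite author's own statement) =====
-- stated objective: faster
-- what changed: Replaces A's greedy find-a-set / copy-and-remove / rescan pipeline (repeated list.count and list.remove scans) with one counting pass and a closed-form test on the two largest multiplicities.
import Mathlib
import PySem

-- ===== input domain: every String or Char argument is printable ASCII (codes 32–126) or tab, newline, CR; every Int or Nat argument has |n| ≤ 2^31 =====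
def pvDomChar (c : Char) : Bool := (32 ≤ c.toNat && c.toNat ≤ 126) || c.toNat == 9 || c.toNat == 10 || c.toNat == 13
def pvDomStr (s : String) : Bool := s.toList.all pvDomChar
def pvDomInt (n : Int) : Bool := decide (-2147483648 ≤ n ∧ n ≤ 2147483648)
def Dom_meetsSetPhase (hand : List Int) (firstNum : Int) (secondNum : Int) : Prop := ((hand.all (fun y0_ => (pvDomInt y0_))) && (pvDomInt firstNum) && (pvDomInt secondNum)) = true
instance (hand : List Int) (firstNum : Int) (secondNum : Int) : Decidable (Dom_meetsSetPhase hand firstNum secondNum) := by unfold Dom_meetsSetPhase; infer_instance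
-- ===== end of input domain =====

-- B replaces A's greedy find-set/copy-remove/rescan with a one-pass counter and a
-- closed-form test on the two largest multiplicities (alternative decomposition).

-- ===== PORT A =====
-- hasValidSet: the inner 'for j in range(setNum): outSet.append(i)' loop
def pvOutSet (i : Int) (setNum : Int) : List Int :=
  (PySem.List.pyRange 0 setNum 1).foldl (fun acc _ => acc ++ [i]) []

-- hasValidSet: the 'for i in hand' scan (count is over the full list passed in)
def pvHvsLoop (full : List Int) (setNum : Int) : List Int → List Int
  | [] => []
  | i :: rest =>
      if setNum ≤ (PySem.List.count full i : Int) then pvOutSet i setNum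
      else pvHvsLoop full setNum rest

def hasValidSet (hand : List Int) (setNum : Int) : List Int :=
  if (hand.length : Int) < setNum ∨ setNum < 1 then []
  else pvHvsLoop hand setNum hand

def meetsSetPhase (hand : List Int) (firstNum : Int) (secondNum : Int) : Bool :=
  -- if secondNum > firstNum: swap
  let f := if firstNum < secondNum then secondNum else firstNum
  let s := if firstNum < secondNum then firstNum else secondNum
  let firstSet := hasValidSet hand f
  if firstSet.length = 0 then false
  else
    -- setHand = hand.copy(); for i in firstSet: setHand.remove(i)
    -- (remove? cannot return none here: firstSet holds copies of a value occurring ≥ f times)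
    let setHand := firstSet.foldl (fun h i => (PySem.List.remove? h i).getD h) hand
    let secondSet := hasValidSet setHand s
    if (secondSet.length : Int) = s then true else false

-- ===== PORT B =====
-- the 'for v in counts.values()' two-largest loop of Source B
def pvTop2 (vals : List Int) : Int × Int :=
  vals.foldl (fun p v => if p.1 < v then (v, p.1) else if p.2 < v then (p.1, v) else p) (0, 0)

def meetsSetPhase_alt (hand : List Int) (firstNum : Int) (secondNum : Int) : Bool :=
  let f := if secondNum ≤ firstNum then firstNum else secondNum
  let s := firstNum + secondNum - f
  if f < 1 ∨ s < 0 then false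
  else
    let counts := hand.foldl (fun d c => d.insert c (d.getD c 0 + 1)) PySem.Dict.empty
    let p := pvTop2 counts.values
    decide ((f ≤ p.1 ∧ s ≤ p.2) ∨ f + s ≤ p.1)

-- ===== PRECONDITION & SPEC =====
def Spec_meetsSetPhase (hand : List Int) (firstNum : Int) (secondNum : Int) (out : Bool) : Prop := out = meetsSetPhase_alt hand firstNum secondNum
instance (hand : List Int) (firstNum : Int) (secondNum : Int) (out : Bool) : Decidable (Spec_meetsSetPhase hand firstNum secondNum out) := by unfold Spec_meetsSetPhase; infer_instance

-- ===== CLAIM (what is proved, stated in full; the proofs are below) =====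
def Claim_equal_meetsSetPhase : Prop := ∀ (hand : List Int) (firstNum : Int) (secondNum : Int), Dom_meetsSetPhase hand firstNum secondNum → Spec_meetsSetPhase hand firstNum secondNum (meetsSetPhase hand firstNum secondNum)

-- ===== LEMMAS AND PROOFS =====

-- ---- A-side: characterize hasValidSet ----
lemma pvFoldAppend {β : Type} (x : Int) (l : List β) :
    ∀ init : List Int, l.foldl (fun acc _ => acc ++ [x]) init = init ++ List.replicate l.length x := by
  induction l with
  | nil => intro init; simp
  | cons b t ih => intro init; simp [List.foldl, ih, List.replicate_succ]

lemma pvOutSet_eq (i n : Int) : pvOutSet i n = List.replicate n.toNat i := by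
  simp only [pvOutSet]
  rw [pvFoldAppend]
  simp [PySem.List.length_pyRange_one]

lemma pvHvsLoop_nil (full : List Int) (n : Int) (l : List Int)
    (h : ∀ i ∈ l, (PySem.List.count full i : Int) < n) : pvHvsLoop full n l = [] := by
  induction l with
  | nil => rfl
  | cons a t ih =>
      have ha := h a (by simp)
      have hna : ¬ n ≤ (PySem.List.count full a : Int) := by omega
      simp only [pvHvsLoop]
      rw [if_neg hna]
      exact ih (fun i hi => h i (by simp [hi]))

lemma pvHvsLoop_found (full : List Int) (n : Int) (l : List Int)
    (h : ∃ i ∈ l, n ≤ (PySem.List.count full i : Int)) :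
    ∃ v, v ∈ l ∧ n ≤ (PySem.List.count full v : Int) ∧
      pvHvsLoop full n l = List.replicate n.toNat v := by
  induction l with
  | nil => simp at h
  | cons a t ih =>
      by_cases ha : n ≤ (PySem.List.count full a : Int)
      · refine ⟨a, by simp, ha, ?_⟩
        simp only [pvHvsLoop]
        rw [if_pos ha, pvOutSet_eq]
      · obtain ⟨i, hi, hni⟩ := h
        rcases List.mem_cons.mp hi with hi | hi
        · exact absurd (hi ▸ hni) ha
        · obtain ⟨v, hv, hnv, he⟩ := ih ⟨i, hi, hni⟩
          refine ⟨v, by simp [hv], hnv, ?_⟩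
          simp only [pvHvsLoop]
          rw [if_neg ha, he]

lemma pvHvs_nil_lt (h : List Int) (n : Int) (hn : n < 1) : hasValidSet h n = [] := by
  simp [hasValidSet, if_pos (Or.inr hn)]

lemma pvHvs_nil (h : List Int) (n : Int)
    (h1 : ∀ i ∈ h, (PySem.List.count h i : Int) < n) : hasValidSet h n = [] := by
  unfold hasValidSet
  split
  · rfl
  · exact pvHvsLoop_nil h n h h1

lemma pvHvs_found (h : List Int) (n : Int) (hn : 1 ≤ n)
    (hex : ∃ i ∈ h, n ≤ (PySem.List.count h i : Int)) :
    ∃ v, v ∈ h ∧ n ≤ (PySem.List.count h v : Int) ∧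
      hasValidSet h n = List.replicate n.toNat v := by
  obtain ⟨v, hv, hnv, he⟩ := pvHvsLoop_found h n h hex
  refine ⟨v, hv, hnv, ?_⟩
  have hlen : ¬ ((h.length : Int) < n ∨ n < 1) := by
    push_neg
    constructor
    · have := List.count_le_length (l := h) (a := v)
      rw [PySem.List.count_eq] at hnv
      omega
    · omega
  simp [hasValidSet, if_neg hlen, he]

-- ---- A-side: removing k copies of v ----
lemma pvRemove_count (k : Nat) (h : List Int) (v : Int) (hk : k ≤ h.count v) :
    ∀ x, ((List.replicate k v).foldl (fun hh i => (PySem.List.remove? hh i).getD hh) h).count x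
      = h.count x - (if x = v then k else 0) := by
  induction k generalizing h with
  | zero => intro x; simp
  | succ m ih =>
      intro x
      have hvmem : v ∈ h := List.count_pos_iff.mp (by omega)
      have hrem : PySem.List.remove? h v = some (h.erase v) :=
        PySem.List.remove?_eq_some_erase h v hvmem
      have hcnt : m ≤ (h.erase v).count v := by
        rw [List.count_erase_self]; omega
      rw [List.replicate_succ]
      simp only [List.foldl_cons, hrem, Option.getD_some]
      rw [ih (h.erase v) hcnt x]
      by_cases hx : x = v
      · subst hx; rw [List.count_erase_self]; simp; omega
      · rw [List.count_erase_of_ne hx]; simp [hx]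

-- ---- B-side: the counter's values are the counts of the distinct elements ----
lemma pvVals (hand : List Int) :
    (hand.foldl (fun d c => d.insert c (d.getD c 0 + 1)) PySem.Dict.empty).values
      = (PySem.Set.ofList hand).map (fun k => (hand.count k : Int)) := by
  rw [PySem.Dict.foldl_insert_getD_add_one_eq_counter]
  simp only [PySem.Dict.values, PySem.Dict.items_counter, List.map_map]
  rfl

-- ---- B-side: the two-largest fold ----
def pvStep (p : Int × Int) (v : Int) : Int × Int :=
  if p.1 < v then (v, p.1) else if p.2 < v then (p.1, v) else p

lemma pvTop2_snoc (l : List Int) (a : Int) : pvTop2 (l ++ [a]) = pvStep (pvTop2 l) a := by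
  simp [pvTop2, pvStep, List.foldl_append]

lemma pvTop2_le (l : List Int) : 0 ≤ (pvTop2 l).2 ∧ (pvTop2 l).2 ≤ (pvTop2 l).1 := by
  induction l using List.reverseRecOn with
  | nil => simp [pvTop2]
  | append_singleton t a ih =>
      rw [pvTop2_snoc]
      unfold pvStep
      split_ifs <;> (try dsimp only) <;> omega

lemma pvTop2_fst_ge (l : List Int) : ∀ x ∈ l, x ≤ (pvTop2 l).1 := by
  induction l using List.reverseRecOn with
  | nil => simp
  | append_singleton t a ih =>
      intro x hx
      rw [pvTop2_snoc]
      unfold pvStep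
      rcases List.mem_append.mp hx with hx | hx
      · have := ih x hx
        split_ifs <;> (try dsimp only) <;> omega
      · simp at hx; subst hx
        split_ifs <;> (try dsimp only) <;> omega

lemma pvTop2_fst_mem (l : List Int) : (pvTop2 l).1 = 0 ∨ (pvTop2 l).1 ∈ l := by
  induction l using List.reverseRecOn with
  | nil => simp [pvTop2]
  | append_singleton t a ih =>
      rw [pvTop2_snoc]
      unfold pvStep
      split_ifs with h1 h2
      · right; simp
      · rcases ih with h | h
        · left; simpa using h
        · right; simp [h]
      · rcases ih with h | h
        · left; simpa using h
        · right; simp [h]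


lemma pvTop2_countP (l : List Int) :
    l.countP (fun z => decide ((pvTop2 l).2 < z)) ≤ 1 := by
  induction l using List.reverseRecOn with
  | nil => simp
  | append_singleton t a ih =>
      have hle := pvTop2_le t
      rw [pvTop2_snoc]
      unfold pvStep
      rw [List.countP_append]
      split_ifs with h1 h2
      · -- new pair (a, c1): nothing in t exceeds c1, a > c1 contributes 1
        have h0 : t.countP (fun z => decide ((pvTop2 t).1 < z)) = 0 := by
          rw [List.countP_eq_zero]
          intro x hx
          have := pvTop2_fst_ge t x hx
          simp; omega
        simp only [h0]
        simp [h1]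
      · -- new pair (c1, a) with c2 < a ≤ c1
        have hmono : t.countP (fun z => decide (a < z)) ≤ t.countP (fun z => decide ((pvTop2 t).2 < z)) := by
          apply List.countP_mono_left
          intro x _ hx
          simp at hx ⊢; omega
        simp only [List.countP_cons, List.countP_nil]
        simp only [decide_eq_true_eq]
        have : ¬ ((a : Int) < a) := by omega
        simp [this]
        omega
      · simp only [List.countP_cons, List.countP_nil]
        have : ¬ ((pvTop2 t).2 < a) := by omega
        simp [this]
        omega

lemma pvTop2_pair (ks : List Int) (cnt : Int → Int)
    (h : 0 < (pvTop2 (ks.map cnt)).2) :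
    ∃ k1 k2 ks', ks.Perm (k1 :: k2 :: ks') ∧
      (pvTop2 (ks.map cnt)).1 ≤ cnt k1 ∧ (pvTop2 (ks.map cnt)).2 ≤ cnt k2 := by
  induction ks using List.reverseRecOn with
  | nil => simp [pvTop2] at h
  | append_singleton t k ih =>
      have hle := pvTop2_le (t.map cnt)
      rw [List.map_append, List.map_singleton, pvTop2_snoc] at h ⊢
      by_cases h1 : (pvTop2 (t.map cnt)).1 < cnt k
      · -- new = (cnt k, c1); c1 = new snd > 0 so c1 ∈ map
        simp only [pvStep, if_pos h1] at h ⊢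
        have hc1mem : (pvTop2 (t.map cnt)).1 ∈ t.map cnt := by
          rcases pvTop2_fst_mem (t.map cnt) with h0 | hm
          · rw [h0] at h; exact absurd h (by omega)
          · exact hm
        obtain ⟨k1, hk1t, hk1⟩ := List.mem_map.mp hc1mem
        refine ⟨k, k1, t.erase k1, ?_, le_refl _, by omega⟩
        exact (List.perm_append_singleton k t).trans ((List.perm_cons_erase hk1t).cons k)
      · by_cases h2 : (pvTop2 (t.map cnt)).2 < cnt k
        · -- new = (c1, cnt k) with c2 < cnt k ≤ c1
          simp only [pvStep, if_neg h1, if_pos h2] at h ⊢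
          have hc1mem : (pvTop2 (t.map cnt)).1 ∈ t.map cnt := by
            rcases pvTop2_fst_mem (t.map cnt) with h0 | hm
            · exact absurd h0 (by omega)
            · exact hm
          obtain ⟨k1, hk1t, hk1⟩ := List.mem_map.mp hc1mem
          refine ⟨k1, k, t.erase k1, ?_, by omega, le_refl _⟩
          exact ((List.perm_append_singleton k t).trans
            ((List.perm_cons_erase hk1t).cons k)).trans (List.Perm.swap k1 k _)
        · simp only [pvStep, if_neg h1, if_neg h2] at h ⊢
          obtain ⟨k1, k2, ks', hperm, ha, hb⟩ := ih h
          refine ⟨k1, k2, k :: ks', ?_, ha, hb⟩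
          exact ((List.perm_append_singleton k t).trans (hperm.cons k)).trans
            ((List.Perm.swap k1 k _).trans ((List.Perm.swap k2 k ks').cons k1))

-- ---- the core equivalence ----
lemma pvMain (hand : List Int) (f s : Int) (hsf : s ≤ f) :
    (let firstSet := hasValidSet hand f;
     if firstSet.length = 0 then false
     else
       let setHand := firstSet.foldl (fun h i => (PySem.List.remove? h i).getD h) hand
       let secondSet := hasValidSet setHand s
       if (secondSet.length : Int) = s then true else false)
    = (if f < 1 ∨ s < 0 then false
       else
         let counts := hand.foldl (fun d c => d.insert c (d.getD c 0 + 1)) PySem.Dict.empty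
         let p := pvTop2 counts.values
         decide ((f ≤ p.1 ∧ s ≤ p.2) ∨ f + s ≤ p.1)) := by
  simp only [pvVals]
  by_cases hf : f < 1
  · rw [pvHvs_nil_lt hand f hf, if_pos (Or.inl hf)]
    simp
  have hf1 : 1 ≤ f := by omega
  have hle2 := pvTop2_le ((PySem.Set.ofList hand).map (fun k => (hand.count k : Int)))
  by_cases hex : ∃ i ∈ hand, f ≤ (PySem.List.count hand i : Int)
  · obtain ⟨v₀, hv₀mem, hv₀cnt, hfirst⟩ := pvHvs_found hand f hf1 hex
    rw [PySem.List.count_eq] at hv₀cnt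
    rw [hfirst]
    have hlenne : ¬ (List.replicate f.toNat v₀).length = 0 := by simp; omega
    rw [if_neg hlenne]
    have hfle : f.toNat ≤ hand.count v₀ := by omega
    have hcntS := pvRemove_count f.toNat hand v₀ hfle
    have hv₀keys : v₀ ∈ PySem.Set.ofList hand := (PySem.Set.mem_ofList _ _).mpr hv₀mem
    have hc1v₀ : (hand.count v₀ : Int) ≤ (pvTop2 ((PySem.Set.ofList hand).map (fun k => (hand.count k : Int)))).1 :=
      pvTop2_fst_ge _ _ (List.mem_map.mpr ⟨v₀, hv₀keys, rfl⟩)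
    by_cases hs : s < 0
    · rw [pvHvs_nil_lt _ s (by omega)]
      rw [if_pos (Or.inr hs)]
      simp only [List.length_nil, Int.natCast_zero]
      rw [if_neg (by omega : ¬ (0 : Int) = s)]
    rw [if_neg (by omega : ¬ (f < 1 ∨ s < 0))]
    by_cases hs1 : s < 1
    · -- s = 0: A succeeds trivially on the second set; B via f + 0 ≤ c1
      rw [pvHvs_nil_lt _ s hs1]
      simp only [List.length_nil, Int.natCast_zero]
      rw [if_pos (by omega : (0 : Int) = s)]
      symm
      simp only [decide_eq_true_iff]
      right
      omega
    have hs1' : 1 ≤ s := by omega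
    by_cases hex2 : ∃ u ∈ (List.replicate f.toNat v₀).foldl (fun h i => (PySem.List.remove? h i).getD h) hand,
        s ≤ (PySem.List.count ((List.replicate f.toNat v₀).foldl (fun h i => (PySem.List.remove? h i).getD h) hand) u : Int)
    · obtain ⟨u, humem, hucnt, hsec⟩ := pvHvs_found _ s hs1' hex2
      rw [PySem.List.count_eq, hcntS u] at hucnt
      rw [hsec]
      simp only [List.length_replicate]
      rw [if_pos (by omega : ((s.toNat : Nat) : Int) = s)]
      symm
      simp only [decide_eq_true_iff]
      by_cases huv : u = v₀
      · subst huv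
        right
        rw [if_pos rfl] at hucnt
        omega
      · -- two distinct values with counts ≥ f and ≥ s
        simp only [if_neg huv] at hucnt
        have humem' : u ∈ hand := by
          have : 0 < hand.count u := by omega
          exact List.count_pos_iff.mp this
        left
        refine ⟨by omega, ?_⟩
        by_contra hlt
        push_neg at hlt
        have hcp := pvTop2_countP ((PySem.Set.ofList hand).map (fun k => (hand.count k : Int)))
        rw [List.countP_map] at hcp
        have hukeys : u ∈ (PySem.Set.ofList hand) := (PySem.Set.mem_ofList _ _).mpr humem'
        have hperm : (PySem.Set.ofList hand).Perm (v₀ :: (PySem.Set.ofList hand).erase v₀) :=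
          List.perm_cons_erase hv₀keys
        have huerase : u ∈ (PySem.Set.ofList hand).erase v₀ := List.mem_erase_of_ne huv |>.mpr hukeys
        rw [hperm.countP_eq] at hcp
        rw [List.countP_cons] at hcp
        have h1 : (0 : Nat) < ((PySem.Set.ofList hand).erase v₀).countP
            ((fun z => decide ((pvTop2 ((PySem.Set.ofList hand).map fun k => (hand.count k : Int))).2 < z)) ∘ fun k => (hand.count k : Int)) := by
          rw [List.countP_pos_iff]
          exact ⟨u, huerase, by simp; omega⟩
        have h2 : ((fun z => decide ((pvTop2 ((PySem.Set.ofList hand).map fun k => (hand.count k : Int))).2 < z)) ∘ fun k => (hand.count k : Int)) v₀ = true := by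
          simp; omega
        simp only [h2, if_pos] at hcp
        omega
    · push_neg at hex2
      have hall2 : ∀ i ∈ (List.replicate f.toNat v₀).foldl (fun h i => (PySem.List.remove? h i).getD h) hand,
          (PySem.List.count ((List.replicate f.toNat v₀).foldl (fun h i => (PySem.List.remove? h i).getD h) hand) i : Int) < s := by
        intro i hi
        have := hex2 i hi
        omega
      rw [pvHvs_nil _ s hall2]
      simp only [List.length_nil, Int.natCast_zero]
      rw [if_neg (by omega : ¬ (0 : Int) = s)]
      symm
      simp only [decide_eq_false_iff_not]
      intro hP
      rcases hP with ⟨hc1, hc2⟩ | hc1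
      · -- f ≤ c1 ∧ s ≤ c2 : extract two distinct values
        obtain ⟨k1, k2, ks', hperm, ha, hb⟩ :=
          pvTop2_pair (PySem.Set.ofList hand) (fun k => (hand.count k : Int)) (by omega)
        have hnd : (k1 :: k2 :: ks').Nodup := hperm.nodup_iff.mp (PySem.Set.nodup_ofList hand)
        have hk12 : k1 ≠ k2 := by
          intro h
          exact (List.nodup_cons.mp hnd).1 (h ▸ List.mem_cons_self)
        have hk1h : k1 ∈ hand := (PySem.Set.mem_ofList _ _).mp (hperm.mem_iff.mpr (by simp))
        have hk2h : k2 ∈ hand := (PySem.Set.mem_ofList _ _).mp (hperm.mem_iff.mpr (by simp))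
        -- pick the one different from v₀; its count in setHand is ≥ s ≥ 1
        by_cases hk2v : k2 = v₀
        · have hk1v : k1 ≠ v₀ := by rw [hk2v] at hk12; exact hk12
          have hcu : s ≤ (hand.count k1 : Int) := by omega
          have hmem : k1 ∈ (List.replicate f.toNat v₀).foldl (fun h i => (PySem.List.remove? h i).getD h) hand := by
            apply List.count_pos_iff.mp
            rw [hcntS k1, if_neg hk1v]
            omega
          have := hall2 k1 hmem
          rw [PySem.List.count_eq, hcntS k1, if_neg hk1v] at this
          omega
        · have hcu : s ≤ (hand.count k2 : Int) := by omega
          have hmem : k2 ∈ (List.replicate f.toNat v₀).foldl (fun h i => (PySem.List.remove? h i).getD h) hand := by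
            apply List.count_pos_iff.mp
            rw [hcntS k2, if_neg hk2v]
            omega
          have := hall2 k2 hmem
          rw [PySem.List.count_eq, hcntS k2, if_neg hk2v] at this
          omega
      · -- f + s ≤ c1 : the value holding c1 already defeats hall2
        have hc1mem : (pvTop2 ((PySem.Set.ofList hand).map (fun k => (hand.count k : Int)))).1
            ∈ (PySem.Set.ofList hand).map (fun k => (hand.count k : Int)) := by
          rcases pvTop2_fst_mem ((PySem.Set.ofList hand).map (fun k => (hand.count k : Int))) with h0 | hm
          · omega
          · exact hm
        obtain ⟨w, hwkeys, hwc⟩ := List.mem_map.mp hc1mem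
        by_cases hwv : w = v₀
        · have hmem : w ∈ (List.replicate f.toNat v₀).foldl (fun h i => (PySem.List.remove? h i).getD h) hand := by
            apply List.count_pos_iff.mp
            rw [hcntS w, if_pos hwv]
            omega
          have := hall2 w hmem
          rw [PySem.List.count_eq, hcntS w, if_pos hwv] at this
          have hcv : hand.count w = hand.count v₀ := by rw [hwv]
          omega
        · have hmem : w ∈ (List.replicate f.toNat v₀).foldl (fun h i => (PySem.List.remove? h i).getD h) hand := by
            apply List.count_pos_iff.mp
            rw [hcntS w, if_neg hwv]
            omega
          have := hall2 w hmem
          rw [PySem.List.count_eq, hcntS w, if_neg hwv] at this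
          omega
  · -- no value occurs f times: A returns False; B has c1 < f
    push_neg at hex
    have hall : ∀ i ∈ hand, (PySem.List.count hand i : Int) < f := fun i hi => by
      have := hex i hi; omega
    rw [pvHvs_nil hand f hall]
    simp only [List.length_nil, if_true]
    by_cases hs : s < 0
    · rw [if_pos (Or.inr hs)]
    · rw [if_neg (by omega : ¬ (f < 1 ∨ s < 0))]
      have hc1 : (pvTop2 ((PySem.Set.ofList hand).map (fun k => (hand.count k : Int)))).1 < f := by
        rcases pvTop2_fst_mem ((PySem.Set.ofList hand).map (fun k => (hand.count k : Int))) with h0 | hm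
        · omega
        · obtain ⟨k, hk, hkc⟩ := List.mem_map.mp hm
          have hkh : k ∈ hand := (PySem.Set.mem_ofList _ _).mp hk
          have := hall k hkh
          rw [PySem.List.count_eq] at this
          omega
      symm
      simp only [decide_eq_false_iff_not]
      intro hP
      rcases hP with ⟨h1, _⟩ | h1 <;> omega

-- ===== VERDICT (by name: the statement is the Claim_ definition above) =====
theorem meetsSetPhase_spec : Claim_equal_meetsSetPhase := by
  intro hand firstNum secondNum _
  unfold Spec_meetsSetPhase meetsSetPhase meetsSetPhase_alt
  by_cases hlt : firstNum < secondNum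
  · have h2 : ¬ (secondNum ≤ firstNum) := by omega
    simp only [if_pos hlt, if_neg h2]
    have hs : firstNum + secondNum - secondNum = firstNum := by omega
    rw [hs]
    exact pvMain hand secondNum firstNum (by omega)
  · have h2 : secondNum ≤ firstNum := by omega
    simp only [if_neg hlt, if_pos h2]
    have hs : firstNum + secondNum - firstNum = secondNum := by omega
    rw [hs]
    exact pvMain hand firstNum secondNum (by omega)
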